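-- pv_equiv track=rewrite | github.com/katJablonska/podstawy-kryptografii | tests.py | series_test
-- ===== SOURCE A (Python) =====
-- def series_test(bits):
--     lengths = [0] * 7
--     current_length = 1
--     current_bit = bits[0]
--
--     for bit in bits[1:]:
--         if bit == current_bit:
--             current_length += 1
--         else:
--             if current_length > 6:
--                 lengths[6] += 1
--             else:
--                 lengths[current_length - 1] += 1
--             current_length = 1
--             current_bit = bit
--
--     if current_length > 6:
--         lengths[6] += 1
--     else:
--         lengths[current_length - 1] += 1
--
--     return (2315 <= lengths[0] <= 2685 and
--             1114 <= lengths[1] <= 1386 and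
--             527 <= lengths[2] <= 723 and
--             240 <= lengths[3] <= 384 and
--             103 <= lengths[4] <= 209 and
--             103 <= lengths[5] <= 209 and
--             103 <= lengths[6] <= 209)
-- ===== SOURCE B (Python) =====
-- def series_test(bits):
--     n = len(bits)
--     starts = [i for i in range(n) if i == 0 or bits[i] != bits[i - 1]]
--     lengths = [0] * 7
--     for a, b in zip(starts, starts[1:] + [n]):
--         lengths[min(b - a, 7) - 1] += 1
--     return (2315 <= lengths[0] <= 2685 and
--             1114 <= lengths[1] <= 1386 and
--             527 <= lengths[2] <= 723 and
--             240 <= lengths[3] <= 384 and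
--             103 <= lengths[4] <= 209 and
--             103 <= lengths[5] <= 209 and
--             103 <= lengths[6] <= 209)
-- ===== Notes on version B (the rewrite author's own statement) =====
-- stated objective: alternative
-- what changed: Replaces A's single-pass streaming state machine (current_bit/current_length updated per element, with a duplicated flush after the loop) by two staged passes with no per-run state: first an adjacency-comparison pass collects the list of run-start indices, then the differences of consecutive start indices (with len(bits) appended) are bucketed into the seven cells.
import Mathlib
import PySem

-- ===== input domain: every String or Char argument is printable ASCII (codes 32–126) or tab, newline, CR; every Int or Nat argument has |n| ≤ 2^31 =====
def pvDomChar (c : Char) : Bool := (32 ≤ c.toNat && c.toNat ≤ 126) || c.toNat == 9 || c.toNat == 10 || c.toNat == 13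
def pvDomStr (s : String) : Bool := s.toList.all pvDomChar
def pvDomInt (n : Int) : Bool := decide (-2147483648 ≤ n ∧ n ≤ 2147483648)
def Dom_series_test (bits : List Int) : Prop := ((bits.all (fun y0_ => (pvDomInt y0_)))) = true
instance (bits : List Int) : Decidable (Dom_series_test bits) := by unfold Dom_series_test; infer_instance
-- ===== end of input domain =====

-- B replaces A's streaming run-length state machine by two staged passes (collect run-start indices by adjacency comparison, then bucket differences of consecutive starts); same O(n) cost, different decomposition.


-- Python `lengths[i] += 1` for a nonnegative index (every index both programs use is ≥ 0 and < 7)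
def pvBump (l : List Int) (i : Nat) : List Int := l.set i (l.getD i 0 + 1)

-- the common final range-check conjunction (indices 0..6 always in range: lengths has 7 cells)
def pvChecks (L : List Int) : Bool :=
  decide (2315 ≤ L.getD 0 0 ∧ L.getD 0 0 ≤ 2685 ∧
          1114 ≤ L.getD 1 0 ∧ L.getD 1 0 ≤ 1386 ∧
          527 ≤ L.getD 2 0 ∧ L.getD 2 0 ≤ 723 ∧
          240 ≤ L.getD 3 0 ∧ L.getD 3 0 ≤ 384 ∧
          103 ≤ L.getD 4 0 ∧ L.getD 4 0 ≤ 209 ∧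
          103 ≤ L.getD 5 0 ∧ L.getD 5 0 ≤ 209 ∧
          103 ≤ L.getD 6 0 ∧ L.getD 6 0 ≤ 209)

-- ===== PORT A =====
-- loop body of A; `.toNat` is exact: current_length starts at 1 and is only incremented or reset to 1, so current_length - 1 ≥ 0
def pvStepA (st : Int × Int × List Int) (bit : Int) : Int × Int × List Int :=
  if bit == st.2.1 then (st.1 + 1, st.2.1, st.2.2)
  else (1, bit, if st.1 > 6 then pvBump st.2.2 6 else pvBump st.2.2 (st.1 - 1).toNat)

-- A's post-loop flush of the last run
def pvFinishA (st : Int × Int × List Int) : List Int :=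
  if st.1 > 6 then pvBump st.2.2 6 else pvBump st.2.2 (st.1 - 1).toNat

def series_test (bits : List Int) : Bool :=
  match bits with
  | [] => false  -- A raises IndexError here (bits[0]); excluded by Pre_series_test
  | b0 :: rest => pvChecks (pvFinishA (rest.foldl pvStepA (1, b0, List.replicate 7 0)))

-- ===== PORT B =====
-- B's comprehension `[i for i in range(n) if i == 0 or bits[i] != bits[i-1]]`
def pvPred (bits : List Int) (i : Nat) : Bool := i == 0 || !(bits.getD i 0 == bits.getD (i-1) 0)
def pvStarts (bits : List Int) : List Nat := (List.range bits.length).filter (pvPred bits)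

-- B's bucketing loop over zip(starts, starts[1:] + [n]); the Python difference b - a is a
-- nonnegative int (starts is strictly increasing and ends below n), so Nat subtraction is exact
def series_test_alt (bits : List Int) : Bool :=
  pvChecks (((pvStarts bits).zip ((pvStarts bits).drop 1 ++ [bits.length])).foldl
    (fun L ab => pvBump L (min (ab.2 - ab.1) 7 - 1)) (List.replicate 7 0))

-- ===== PRECONDITION & SPEC =====
-- Pre_ excludes only the empty list, on which A raises IndexError.
def Pre_series_test (bits : List Int) : Prop := bits ≠ []
instance (bits : List Int) : Decidable (Pre_series_test bits) := by unfold Pre_series_test; infer_instance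
def pvWitness_series_test : List Int := [0, 1, 1, 0]

def Spec_series_test (bits : List Int) (out : Bool) : Prop := out = series_test_alt bits
instance (bits : List Int) (out : Bool) : Decidable (Spec_series_test bits out) := by unfold Spec_series_test; infer_instance

-- ===== CLAIM (what is proved, stated in full; the proofs are below) =====
def Claim_equal_series_test : Prop := ∀ (bits : List Int), Dom_series_test bits → Pre_series_test bits → Spec_series_test bits (series_test bits)

-- ===== LEMMAS AND PROOFS =====

-- the run-length bucket both programs use: index min(r,7)-1
def pvBucket (r : Nat) : Nat := min r 7 - 1

def pvBFold (L : List Int) (rs : List Nat) : List Int :=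
  rs.foldl (fun L r => pvBump L (pvBucket r)) L

-- run lengths of a list, greedy from the left
def pvRuns : List Int → List Nat
  | [] => []
  | v :: t => ((t.takeWhile (· == v)).length + 1) :: pvRuns (t.dropWhile (· == v))
termination_by l => l.length
decreasing_by simp; have := List.length_dropWhile_le (· == v) t; omega

-- runs of (k copies of b) ++ xs, as A's state machine sees them
def pvRunsAux (b : Int) (k : Nat) : List Int → List Nat
  | [] => [k]
  | x :: xs => if x == b then pvRunsAux b (k + 1) xs else k :: pvRunsAux x 1 xs

theorem pvBucket_int (k : Nat) (L : List Int) :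
    (if ((k : Int)) > 6 then pvBump L 6 else pvBump L (((k : Int)) - 1).toNat) = pvBump L (pvBucket k) := by
  by_cases h : k > 6
  · rw [if_pos (by exact_mod_cast by omega)]
    unfold pvBucket; congr 1; omega
  · rw [if_neg (by omega)]
    unfold pvBucket; congr 1; omega

theorem pvA_fold (xs : List Int) : ∀ (k : Nat) (b : Int) (L : List Int),
    pvFinishA (xs.foldl pvStepA ((k : Int), b, L)) = pvBFold L (pvRunsAux b k xs) := by
  induction xs with
  | nil =>
    intro k b L
    simp only [List.foldl_nil, pvRunsAux, pvBFold, List.foldl_cons, List.foldl_nil, pvFinishA]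
    exact pvBucket_int k L
  | cons x xs ih =>
    intro k b L
    simp only [List.foldl_cons, pvStepA, pvRunsAux]
    by_cases h : x == b
    · rw [if_pos h, if_pos h]
      have : ((k : Int) + 1) = ((k + 1 : Nat) : Int) := by push_cast; ring
      rw [this]; exact ih (k + 1) b L
    · rw [if_neg h, if_neg h]
      rw [pvBucket_int k L]
      have : (1 : Int) = ((1 : Nat) : Int) := rfl
      rw [this, ih 1 x (pvBump L (pvBucket k))]
      simp [pvBFold]

theorem pvRunsAux_eq (xs : List Int) : ∀ (b : Int) (k : Nat),
    pvRunsAux b k xs = ((xs.takeWhile (· == b)).length + k) :: pvRuns (xs.dropWhile (· == b)) := by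
  induction xs with
  | nil => intro b k; simp [pvRunsAux, pvRuns]
  | cons x xs ih =>
    intro b k
    by_cases h : x == b
    · simp only [pvRunsAux, List.takeWhile_cons, h, List.dropWhile_cons, if_pos]
      rw [ih b (k + 1)]
      congr 1
      simp
      omega
    · rw [Bool.not_eq_true] at h
      simp only [pvRunsAux, h, if_false, List.takeWhile_cons, List.dropWhile_cons, Bool.false_eq_true,
        List.length_nil, Nat.zero_add]
      rw [ih x 1]
      conv_rhs => rw [pvRuns]

-- the difference sequence B buckets: consecutive starts, then the endpoint n
def pvDiffs (l : List Nat) (n : Nat) : List Nat :=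
  (l.zip (l.drop 1 ++ [n])).map (fun ab => ab.2 - ab.1)

theorem pvDiffs_cons (a : Nat) (xs : List Nat) (n : Nat) :
    pvDiffs (a :: xs) n = ((xs ++ [n]).headD 0 - a) :: pvDiffs xs n := by
  cases xs with
  | nil => simp [pvDiffs]
  | cons x xs' => simp [pvDiffs]

theorem pvDiffs_map_succ (xs : List Nat) (n : Nat) :
    pvDiffs (xs.map Nat.succ) (n + 1) = pvDiffs xs n := by
  induction xs with
  | nil => rfl
  | cons a xs ih =>
    rw [List.map_cons, pvDiffs_cons, pvDiffs_cons, ih]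
    congr 1
    cases xs with
    | nil => simp
    | cons x xs' => simp [Nat.succ_sub_succ]

theorem pvStarts_cons (v : Int) (t : List Int) :
    pvStarts (v :: t) =
      0 :: ((List.range t.length).filter (fun i => pvPred (v :: t) (i + 1))).map Nat.succ := by
  unfold pvStarts
  rw [List.length_cons, List.range_succ_eq_map, List.filter_cons, List.filter_map]
  have h0 : pvPred (v :: t) 0 = true := by simp [pvPred]
  rw [h0]
  rfl

theorem pvPred_shift (v w : Int) (t' : List Int) (i : Nat) :
    pvPred (v :: w :: t') (i + 2) = pvPred (w :: t') (i + 1) := by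
  simp [pvPred]

theorem pvStarts_cons_cons (v w : Int) (t' : List Int) :
    pvStarts (v :: w :: t') =
      if w == v then 0 :: ((pvStarts (w :: t')).drop 1).map Nat.succ
      else 0 :: (pvStarts (w :: t')).map Nat.succ := by
  rw [pvStarts_cons v (w :: t'), pvStarts_cons w t']
  rw [List.length_cons, List.range_succ_eq_map, List.filter_cons, List.filter_map]
  have h1 : pvPred (v :: w :: t') 1 = !(w == v) := by simp [pvPred]
  have h2 : ((fun i => pvPred (v :: w :: t') (i + 1)) ∘ Nat.succ) = (fun i => pvPred (w :: t') (i + 1)) := by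
    funext i; exact pvPred_shift v w t' i
  rw [h1, h2]
  by_cases h : w == v
  · simp [h, List.map_map]
  · simp [h, List.map_map]

-- pvStarts of a nonempty list begins with 0
theorem pvStarts_head (v : Int) (t : List Int) :
    pvStarts (v :: t) = 0 :: (pvStarts (v :: t)).drop 1 := by
  rw [pvStarts_cons]; rfl

-- MAIN B-side lemma: the start-index differences are exactly the greedy run lengths
theorem pvDiffs_starts (bits : List Int) :
    pvDiffs (pvStarts bits) bits.length = pvRuns bits := by
  induction bits with
  | nil => simp [pvStarts, pvDiffs, pvRuns]
  | cons v t ih =>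
    cases t with
    | nil =>
      have h : pvStarts [v] = [0] := by simp [pvStarts, List.range_succ, pvPred]
      rw [h]
      simp [pvDiffs, pvRuns]
    | cons w t' =>
      obtain ⟨S', hS⟩ : ∃ S', pvStarts (w :: t') = 0 :: S' := ⟨_, pvStarts_head w t'⟩
      rw [pvStarts_cons_cons]
      by_cases h : w == v
      · have hwv : w = v := eq_of_beq h
        subst hwv
        rw [if_pos (by simp), hS]
        simp only [List.drop_succ_cons, List.drop_zero]
        rw [hS, pvDiffs_cons, pvRuns] at ih
        simp only [List.length_cons, List.cons.injEq] at ih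
        obtain ⟨h1, h2⟩ := ih
        rw [pvDiffs_cons]
        conv_rhs => rw [pvRuns]
        rw [List.takeWhile_cons_of_pos (by simp), List.dropWhile_cons_of_pos (by simp)]
        simp only [List.length_cons, List.cons.injEq]
        refine ⟨?_, ?_⟩
        · cases S' with
          | nil => simp at h1 ⊢; omega
          | cons s S'' => simp at h1 ⊢; omega
        · rw [pvDiffs_map_succ S' (t'.length + 1)]
          exact h2
      · rw [if_neg h, hS, List.map_cons, pvDiffs_cons]
        conv_rhs => rw [pvRuns]
        rw [List.takeWhile_cons_of_neg (by simpa using h), List.dropWhile_cons_of_neg (by simpa using h)]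
        simp only [List.length_nil, List.length_cons, Nat.zero_add, List.cons.injEq]
        refine ⟨by simp, ?_⟩
        have hmap : Nat.succ 0 :: S'.map Nat.succ = (0 :: S').map Nat.succ := rfl
        rw [hmap, ← hS]
        have hm := pvDiffs_map_succ (pvStarts (w :: t')) (t'.length + 1)
        rw [hm]
        simpa using ih

-- collapsing B's fold over the zip into pvBFold over the diffs
theorem pvB_fold (l : List Nat) (n : Nat) (L : List Int) :
    (l.zip (l.drop 1 ++ [n])).foldl (fun L ab => pvBump L (min (ab.2 - ab.1) 7 - 1)) L
      = pvBFold L (pvDiffs l n) := by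
  unfold pvBFold pvDiffs
  rw [List.foldl_map]
  rfl

-- ===== VERDICT (by name: the statement is the Claim_ definition above) =====
theorem series_test_spec : Claim_equal_series_test := by
  intro bits _ hpre
  unfold Spec_series_test
  match bits with
  | [] => exact absurd rfl hpre
  | b0 :: rest =>
    have hA : series_test (b0 :: rest) = pvChecks (pvFinishA (rest.foldl pvStepA (1, b0, List.replicate 7 0))) := rfl
    rw [hA]
    unfold series_test_alt
    rw [pvB_fold, pvDiffs_starts]
    congr 1
    have hfold := pvA_fold rest 1 b0 (List.replicate 7 0)
    simp only [Nat.cast_one] at hfold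
    rw [hfold, pvRunsAux_eq]
    conv_rhs => rw [pvRuns]
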